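-- pv_equiv track=rewrite | github.com/macarenageorgina/TrabajoPracticoFinal | analisis_recursivo.py | filtrar_gastos_recursivo
-- ===== SOURCE A (Python) =====
-- def filtrar_gastos_recursivo(gastos_lista, umbral, indice=0):
--     """
--     Filtra los gastos mayores a un umbral de forma recursiva.
--     """
--     if indice >= len(gastos_lista):
--         return []
--
--     if gastos_lista[indice]["monto"] > umbral:
--         return [gastos_lista[indice]] + filtrar_gastos_recursivo(
--             gastos_lista, umbral, indice + 1
--         )
--     else:
--         return filtrar_gastos_recursivo(gastos_lista, umbral, indice + 1)
-- ===== SOURCE B (Python) =====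
-- def filtrar_gastos_recursivo(gastos_lista, umbral, indice=0):
--     """
--     Filtra los gastos mayores a un umbral con un bucle iterativo
--     que acumula el resultado (sin recursion).
--     """
--     resultado = []
--     for i in range(indice, len(gastos_lista)):
--         if gastos_lista[i]["monto"] > umbral:
--             resultado.append(gastos_lista[i])
--     return resultado
-- ===== Notes on version B (the rewrite author's own statement) =====
-- stated objective: simpler
-- what changed: Replaces the list-building recursion over an index with a single flat loop over range(indice, len) that appends kept expenses to an accumulator; no call stack, no per-step list concatenation.
import Mathlib
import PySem

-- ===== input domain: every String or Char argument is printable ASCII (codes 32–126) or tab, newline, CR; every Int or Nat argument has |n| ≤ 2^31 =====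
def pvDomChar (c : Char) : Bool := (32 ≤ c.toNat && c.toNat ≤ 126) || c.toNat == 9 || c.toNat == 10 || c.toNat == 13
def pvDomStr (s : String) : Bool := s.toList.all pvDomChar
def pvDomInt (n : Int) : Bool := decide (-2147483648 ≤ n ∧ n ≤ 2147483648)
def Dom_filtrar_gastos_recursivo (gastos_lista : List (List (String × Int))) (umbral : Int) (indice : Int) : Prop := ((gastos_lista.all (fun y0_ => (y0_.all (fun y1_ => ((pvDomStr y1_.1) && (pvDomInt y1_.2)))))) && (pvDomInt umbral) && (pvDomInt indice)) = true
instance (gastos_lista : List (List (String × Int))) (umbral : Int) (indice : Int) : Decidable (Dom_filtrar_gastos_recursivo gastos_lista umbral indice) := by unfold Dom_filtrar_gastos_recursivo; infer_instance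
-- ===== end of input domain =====

-- B replaces A's index recursion by a single accumulator loop over range(indice, len); objective: simpler.


-- ===== PORT A =====
def filtrar_gastos_recursivo (gastos_lista : List (List (String × Int))) (umbral : Int) (indice : Int) : List (List (String × Int)) :=
  if (gastos_lista.length : Int) ≤ indice then []
  else
    match PySem.List.pyGet? gastos_lista indice with
    | none => []            -- IndexError (indice < -len); excluded by Pre_
    | some g =>
      match g.lookup "monto" with
      | none => []          -- KeyError; excluded by Pre_
      | some m =>
        if m > umbral then
          g :: filtrar_gastos_recursivo gastos_lista umbral (indice + 1)
        else
          filtrar_gastos_recursivo gastos_lista umbral (indice + 1)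
termination_by ((gastos_lista.length : Int) - indice).toNat
decreasing_by omega

-- ===== PORT B =====
def filtrar_gastos_recursivo_alt (gastos_lista : List (List (String × Int))) (umbral : Int) (indice : Int) : List (List (String × Int)) :=
  (PySem.List.pyRange indice (gastos_lista.length : Int) 1).foldl
    (fun resultado i =>
      match PySem.List.pyGet? gastos_lista i with
      | none => resultado   -- IndexError; excluded by Pre_
      | some g =>
        match g.lookup "monto" with
        | none => resultado -- KeyError; excluded by Pre_
        | some m => if m > umbral then resultado ++ [g] else resultado)
    []

-- ===== PRECONDITION & SPEC =====
-- Pre_ excludes exactly the inputs where A raises: IndexError when indice < -len(gastos_lista)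
-- while indice < len, and KeyError when some inspected expense lacks the key "monto".
def Pre_filtrar_gastos_recursivo (gastos_lista : List (List (String × Int))) (umbral : Int) (indice : Int) : Prop :=
  (indice < (gastos_lista.length : Int) → -(gastos_lista.length : Int) ≤ indice) ∧
  (if indice < 0 then
     ∀ g ∈ gastos_lista, (g.lookup "monto").isSome
   else
     ∀ g ∈ gastos_lista.drop indice.toNat, (g.lookup "monto").isSome)
instance (gastos_lista : List (List (String × Int))) (umbral : Int) (indice : Int) : Decidable (Pre_filtrar_gastos_recursivo gastos_lista umbral indice) := by unfold Pre_filtrar_gastos_recursivo; infer_instance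

def pvWitness_filtrar_gastos_recursivo : (List (List (String × Int))) × Int × Int :=
  ([[("monto", 7)], [("monto", 2)]], 3, 0)

def Spec_filtrar_gastos_recursivo (gastos_lista : List (List (String × Int))) (umbral : Int) (indice : Int) (out : List (List (String × Int))) : Prop := out = filtrar_gastos_recursivo_alt gastos_lista umbral indice
instance (gastos_lista : List (List (String × Int))) (umbral : Int) (indice : Int) (out : List (List (String × Int))) : Decidable (Spec_filtrar_gastos_recursivo gastos_lista umbral indice out) := by unfold Spec_filtrar_gastos_recursivo; infer_instance

-- ===== CLAIM (what is proved, stated in full; the proofs are below) =====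
def Claim_equal_filtrar_gastos_recursivo : Prop := ∀ (gastos_lista : List (List (String × Int))) (umbral : Int) (indice : Int), Dom_filtrar_gastos_recursivo gastos_lista umbral indice → Pre_filtrar_gastos_recursivo gastos_lista umbral indice → Spec_filtrar_gastos_recursivo gastos_lista umbral indice (filtrar_gastos_recursivo gastos_lista umbral indice)

-- ===== LEMMAS AND PROOFS =====

-- Pre_ is preserved when the loop/recursion advances from indice to indice+1.
lemma pre_succ (L : List (List (String × Int))) (u i : Int)
    (hi : i < (L.length : Int))
    (h : Pre_filtrar_gastos_recursivo L u i) :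
    Pre_filtrar_gastos_recursivo L u (i + 1) := by
  obtain ⟨h1, h2⟩ := h
  refine ⟨fun _ => by have := h1 hi; omega, ?_⟩
  by_cases hneg : i < 0
  · simp only [hneg, if_pos] at h2
    by_cases hneg' : i + 1 < 0
    · simpa [hneg'] using h2
    · have : (i + 1).toNat = 0 := by omega
      simpa [hneg', this] using h2
  · have hneg' : ¬ (i + 1 < 0) := by omega
    simp only [hneg, if_neg, not_false_iff] at h2
    simp only [hneg', if_neg, not_false_iff]
    intro g hg
    apply h2
    have heq : (i + 1).toNat = i.toNat + 1 := by omega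
    rw [heq, ← List.drop_drop (i := 1) (j := i.toNat)] at hg
    exact List.drop_subset _ _ hg

-- When indice is in bounds, the accessed element exists and has a "monto" entry.
lemma step_some (L : List (List (String × Int))) (u i : Int)
    (hi : i < (L.length : Int))
    (h : Pre_filtrar_gastos_recursivo L u i) :
    ∃ g m, PySem.List.pyGet? L i = some g ∧ g.lookup "monto" = some m := by
  obtain ⟨h1, h2⟩ := h
  have hlo : -(L.length : Int) ≤ i := h1 hi
  have hsome : ∃ g, PySem.List.pyGet? L i = some g := by
    rcases hg : PySem.List.pyGet? L i with _ | g
    · rw [PySem.List.pyGet?_eq_none_iff] at hg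
      exact absurd ⟨hlo, hi⟩ hg
    · exact ⟨g, rfl⟩
  obtain ⟨g, hg⟩ := hsome
  have hmem : g ∈ (if i < 0 then L else L.drop i.toNat) := by
    by_cases hneg : i < 0
    · simpa [hneg] using PySem.List.mem_of_pyGet?_eq_some L hg
    · have h0 : 0 ≤ i := by omega
      rw [PySem.List.pyGet?_of_nonneg L h0] at hg
      have hlt : i.toNat < L.length := by omega
      rw [List.getElem?_eq_getElem hlt] at hg
      obtain rfl : L[i.toNat] = g := Option.some.inj hg
      simp only [hneg, if_neg, not_false_iff]
      have hlen : 0 < (L.drop i.toNat).length := by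
        simp only [List.length_drop]; omega
      have hmem0 : (L.drop i.toNat)[0]'hlen ∈ L.drop i.toNat := List.getElem_mem hlen
      have hd : (L.drop i.toNat)[0]'hlen = L[i.toNat]'hlt := by
        rw [List.getElem_drop]
        simp only [Nat.add_zero]
      exact hd ▸ hmem0
  have hmonto : (g.lookup "monto").isSome := by
    by_cases hneg : i < 0
    · simp only [hneg, if_pos] at h2 hmem; exact h2 g hmem
    · simp only [hneg, if_neg, not_false_iff] at h2 hmem; exact h2 g hmem
  obtain ⟨m, hm⟩ := Option.isSome_iff_exists.mp hmonto
  exact ⟨g, m, hg, hm⟩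

-- Loop characterisation: B's fold from indice, started at any accumulator, appends A's result.
lemma loop_eq (L : List (List (String × Int))) (u : Int) :
    ∀ (n : Nat) (i : Int), ((L.length : Int) - i).toNat = n →
      Pre_filtrar_gastos_recursivo L u i →
      ∀ acc : List (List (String × Int)),
        (PySem.List.pyRange i (L.length : Int) 1).foldl
          (fun resultado j =>
            match PySem.List.pyGet? L j with
            | none => resultado
            | some g =>
              match g.lookup "monto" with
              | none => resultado
              | some m => if m > u then resultado ++ [g] else resultado)
          acc
        = acc ++ filtrar_gastos_recursivo L u i := by
  intro n
  induction n with
  | zero =>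
    intro i hn _ acc
    have hle : (L.length : Int) ≤ i := by omega
    rw [PySem.List.pyRange_one_eq_nil hle, filtrar_gastos_recursivo]
    simp [hle]
  | succ k ih =>
    intro i hn hpre acc
    have hi : i < (L.length : Int) := by omega
    obtain ⟨g, m, hg, hm⟩ := step_some L u i hi hpre
    rw [PySem.List.pyRange_one_cons hi]
    simp only [List.foldl_cons, hg, hm]
    have hpre' := pre_succ L u i hi hpre
    have hn' : ((L.length : Int) - (i + 1)).toNat = k := by omega
    rw [filtrar_gastos_recursivo]
    simp only [hg, hm, if_neg (by omega : ¬ (L.length : Int) ≤ i)]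
    by_cases hcmp : m > u
    · simp only [hcmp, if_pos]
      rw [ih (i + 1) hn' hpre' (acc ++ [g])]
      simp
    · simp only [hcmp, if_neg, not_false_iff]
      exact ih (i + 1) hn' hpre' acc

-- ===== VERDICT (by name: the statement is the Claim_ definition above) =====
theorem filtrar_gastos_recursivo_spec : Claim_equal_filtrar_gastos_recursivo := by
  intro L u i _ hpre
  unfold Spec_filtrar_gastos_recursivo filtrar_gastos_recursivo_alt
  have := loop_eq L u (((L.length : Int) - i).toNat) i rfl hpre []
  rw [this, List.nil_append]
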